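-- pv_equiv track=rewrite | github.com/Borisko234/Python | move_special_char.py | moveSpecialChar
-- ===== SOURCE A (Python) =====
-- def moveSpecialChar(word:str) -> str:
--     normalChar = []
--     specialChar = []
--     for char in word:
--         if char.isalnum():
--             normalChar.append(char)
--         if not char.isalnum():
--             specialChar.append(char)
--     return ''.join(normalChar + specialChar)
-- ===== SOURCE B (Python) =====
-- def moveSpecialChar(word: str) -> str:
--     return ''.join(sorted(word, key=lambda c: not c.isalnum()))
-- ===== Notes on version B (the rewrite author's own statement) =====
-- stated objective: idiomatic
-- what changed: Replaced the two-accumulator partition loop with a one-line stable sort keyed on the negated isalnum test; stability preserves the within-group order, reproducing A exactly.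
import Mathlib
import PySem

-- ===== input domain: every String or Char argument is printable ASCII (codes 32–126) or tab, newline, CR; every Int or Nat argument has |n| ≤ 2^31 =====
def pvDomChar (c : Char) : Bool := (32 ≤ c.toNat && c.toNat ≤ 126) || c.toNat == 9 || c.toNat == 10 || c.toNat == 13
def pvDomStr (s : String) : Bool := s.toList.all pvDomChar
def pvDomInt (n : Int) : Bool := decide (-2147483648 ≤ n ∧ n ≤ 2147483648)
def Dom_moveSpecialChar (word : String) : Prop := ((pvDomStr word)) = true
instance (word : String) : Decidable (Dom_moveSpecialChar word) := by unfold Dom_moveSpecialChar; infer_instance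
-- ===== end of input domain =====

-- B replaces A's two-accumulator partition loop with one stable sort keyed on the boolean
-- 'not c.isalnum()' (idiomatic one-liner); return values agree on every string.

-- ===== PORT A =====
-- the loop body: both ifs of A, in order, on the (normalChar, specialChar) pair
def moveSpecialCharStep (acc : List Char × List Char) (c : Char) : List Char × List Char :=
  let acc1 := if PySem.Chars.isalnum c then (acc.1 ++ [c], acc.2) else acc
  if !(PySem.Chars.isalnum c) then (acc1.1, acc1.2 ++ [c]) else acc1

def moveSpecialChar (word : String) : String :=
  let acc := word.toList.foldl moveSpecialCharStep ([], [])
  String.ofList (acc.1 ++ acc.2)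

-- ===== PORT B =====
def moveSpecialChar_alt (word : String) : String :=
  String.ofList (PySem.List.sorted word.toList (fun c => !PySem.Chars.isalnum c) false)

-- ===== PRECONDITION & SPEC =====
def Spec_moveSpecialChar (word : String) (out : String) : Prop := out = moveSpecialChar_alt word
instance (word : String) (out : String) : Decidable (Spec_moveSpecialChar word out) := by unfold Spec_moveSpecialChar; infer_instance

-- ===== CLAIM (what is proved, stated in full; the proofs are below) =====
def Claim_equal_moveSpecialChar : Prop := ∀ (word : String), Dom_moveSpecialChar word → Spec_moveSpecialChar word (moveSpecialChar word)

-- ===== LEMMAS AND PROOFS =====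

-- A's loop computes the partition, appended to any starting accumulator
theorem moveSpecialChar_foldl (xs : List Char) (n s : List Char) :
    xs.foldl moveSpecialCharStep (n, s)
      = (n ++ xs.filter (fun c => PySem.Chars.isalnum c),
         s ++ xs.filter (fun c => !PySem.Chars.isalnum c)) := by
  induction xs generalizing n s with
  | nil => simp
  | cons c cs ih =>
    by_cases h : PySem.Chars.isalnum c <;>
      simp [moveSpecialCharStep, h, ih]

-- inserting a false-key element into (all-false ++ all-true) lands between the groups;
-- inserting a true-key element lands at the very end
theorem insertBy_bool_key {α : Type} (key : α → Bool) (x : α) (F T : List α)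
    (hF : ∀ y ∈ F, key y = false) (hT : ∀ y ∈ T, key y = true) :
    PySem.List.insertBy (fun a b => decide (key a < key b)) x (F ++ T)
      = if key x then F ++ T ++ [x] else F ++ x :: T := by
  induction F with
  | nil =>
    simp only [List.nil_append]
    cases T with
    | nil => cases h : key x <;> simp [PySem.List.insertBy]
    | cons t ts =>
      have ht : key t = true := hT t (by simp)
      cases h : key x with
      | false => simp [PySem.List.insertBy, h, ht]
      | true =>
        have : ∀ y ∈ t :: ts, (fun a b => decide (key a < key b)) x y = false := by
          intro y hy; simp [h, hT y hy]
        simpa [h] using PySem.List.insertBy_of_forall_not_before _ x (t :: ts) this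
  | cons f fs ih =>
    have hf : key f = false := hF f (by simp)
    have ih' := ih (fun y hy => hF y (by simp [hy]))
    cases h : key x <;>
      simp_all [PySem.List.insertBy]

-- B's stable sort on a boolean key IS the partition
theorem sorted_bool_key {α : Type} (key : α → Bool) (xs : List α) :
    PySem.List.sorted xs key false
      = xs.filter (fun c => !key c) ++ xs.filter (fun c => key c) := by
  induction xs using List.reverseRecOn with
  | nil => simp [PySem.List.sorted_eq_foldl_insertBy]
  | append_singleton cs x ih =>
    rw [PySem.List.sorted_eq_foldl_insertBy] at *
    rw [List.foldl_append, List.foldl_cons, List.foldl_nil, ih,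
        insertBy_bool_key key x _ _
          (by intro y hy; simpa using (List.of_mem_filter hy))
          (by intro y hy; simpa using (List.of_mem_filter hy))]
    cases h : key x <;> simp [List.filter_append, h]

-- ===== VERDICT (by name: the statement is the Claim_ definition above) =====
theorem moveSpecialChar_spec : Claim_equal_moveSpecialChar := by
  intro word _
  unfold Spec_moveSpecialChar moveSpecialChar moveSpecialChar_alt
  rw [moveSpecialChar_foldl, sorted_bool_key]
  simp
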